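-- pv_equiv track=rewrite | github.com/YongxinLiu/EasyMicrobiome | script/slime2/slime2.py | parse_one_column_klasses
-- ===== SOURCE A (Python) =====
-- def parse_one_column_klasses(lines, comment="#"):
--     '''
--     one-column files have a header line with the name of the class, then the
--     samples in that class, then a blank line before the next class. for example,
--     lines would be like: sick, sick_guy1, sick_guy2, blank, healthy, healthy_guy1, etc.
--     '''
--
--     samples = []
--     klasses = []
--
--     read_klass = True # flag for asking if the next non-comment line is a class name
--     for line in lines:
--         if line.startswith(comment):
--             # ignore comment lines
--             continue
--         elif line == "":
--             # the next line after a blank is a class name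
--             read_klass = True
--         elif read_klass:
--             # the next lines after the class are samples
--             klass = line
--             read_klass = False
--         else:
--             sample = line
--             samples.append(sample)
--             klasses.append(klass)
--
--     return samples, klasses
-- ===== SOURCE B (Python) =====
-- def parse_one_column_klasses(lines, comment="#"):
--     # Block decomposition: split into blank-separated blocks (comment lines dropped),
--     # then head of each block is the class and the rest are its samples.
--     blocks = []
--     cur = []
--     for line in lines:
--         if line.startswith(comment):
--             continue
--         if line == "":
--             blocks.append(cur)
--             cur = []
--         else:
--             cur.append(line)
--     blocks.append(cur)
--     samples = [s for b in blocks for s in b[1:]]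
--     klasses = [b[0] for b in blocks for s in b[1:]]
--     return samples, klasses
-- ===== Notes on version B (the rewrite author's own statement) =====
-- stated objective: alternative
-- what changed: Replaced the flag-driven state machine by a two-phase block decomposition: first split the lines into blank-separated blocks (dropping comment lines), then flatten each block's tail as samples paired with its head as the class.
import Mathlib
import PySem

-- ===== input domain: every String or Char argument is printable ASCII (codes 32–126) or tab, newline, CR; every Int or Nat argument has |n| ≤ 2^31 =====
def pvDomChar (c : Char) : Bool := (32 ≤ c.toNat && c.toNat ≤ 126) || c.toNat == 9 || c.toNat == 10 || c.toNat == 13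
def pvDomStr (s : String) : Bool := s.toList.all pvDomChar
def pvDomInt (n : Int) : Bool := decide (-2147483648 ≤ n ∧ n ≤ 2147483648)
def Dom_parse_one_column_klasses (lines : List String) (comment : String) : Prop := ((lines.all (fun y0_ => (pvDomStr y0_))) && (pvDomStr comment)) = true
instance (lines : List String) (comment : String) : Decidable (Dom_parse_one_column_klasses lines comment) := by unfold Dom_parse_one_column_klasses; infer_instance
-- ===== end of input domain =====

-- Block-decomposition rewrite of the flag-driven class-file parser (alternative, same cost).
-- ===== PORT A =====
def parse_one_column_klasses (lines : List String) (comment : String) : List String × List String :=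
  let st := lines.foldl
    (fun (st : List String × List String × Bool × String) line =>
      let (samples, klasses, read_klass, klass) := st
      if PySem.Str.startswith line comment then st
      else if line = "" then (samples, klasses, true, klass)
      else if read_klass then (samples, klasses, false, line)
      else (samples ++ [line], klasses ++ [klass], read_klass, klass))
    ([], [], true, "")
  (st.1, st.2.1)

-- ===== PORT B =====
def parse_one_column_klasses_alt (lines : List String) (comment : String) : List String × List String :=
  let st := lines.foldl
    (fun (st : List (List String) × List String) line =>
      if PySem.Str.startswith line comment then st
      else if line = "" then (st.1 ++ [st.2], [])
      else (st.1, st.2 ++ [line]))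
    ([], [])
  let blocks := st.1 ++ [st.2]
  (blocks.flatMap (fun b => b.drop 1),
   blocks.flatMap (fun b => (b.drop 1).map (fun _ => b.headD "")))

-- ===== PRECONDITION & SPEC =====
def Spec_parse_one_column_klasses (lines : List String) (comment : String) (out : List String × List String) : Prop := out = parse_one_column_klasses_alt lines comment
instance (lines : List String) (comment : String) (out : List String × List String) : Decidable (Spec_parse_one_column_klasses lines comment out) := by unfold Spec_parse_one_column_klasses; infer_instance

-- ===== CLAIM (what is proved, stated in full; the proofs are below) =====
def Claim_equal_parse_one_column_klasses : Prop := ∀ (lines : List String) (comment : String), Dom_parse_one_column_klasses lines comment → Spec_parse_one_column_klasses lines comment (parse_one_column_klasses lines comment)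

-- ===== LEMMAS AND PROOFS =====

-- the loop bodies of the two ports, named for the proofs (definitionally equal to the inline lambdas)
def pvAstep (comment : String) (st : List String × List String × Bool × String) (line : String) :
    List String × List String × Bool × String :=
  let (samples, klasses, read_klass, klass) := st
  if PySem.Str.startswith line comment then st
  else if line = "" then (samples, klasses, true, klass)
  else if read_klass then (samples, klasses, false, line)
  else (samples ++ [line], klasses ++ [klass], read_klass, klass)

def pvBstep (comment : String) (st : List (List String) × List String) (line : String) :
    List (List String) × List String :=
  if PySem.Str.startswith line comment then st
  else if line = "" then (st.1 ++ [st.2], [])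
  else (st.1, st.2 ++ [line])

-- samples / klasses contributed by a list of finished blocks
def pvS (blocks : List (List String)) : List String := blocks.flatMap (fun b => b.drop 1)
def pvK (blocks : List (List String)) : List String :=
  blocks.flatMap (fun b => (b.drop 1).map (fun _ => b.headD ""))

-- A's fold state corresponding to B's state (blocks, cur); kl is A's leftover klass slot
def pvStateOf (blocks : List (List String)) (cur : List String) (kl : String) :
    List String × List String × Bool × String :=
  match cur with
  | [] => (pvS blocks, pvK blocks, true, kl)
  | k :: t => (pvS blocks ++ t, pvK blocks ++ t.map (fun _ => k), false, k)

lemma pv_key (comment : String) :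
    ∀ (rest : List String) (blocks : List (List String)) (cur : List String) (kl : String),
      ∃ kl',
        List.foldl (pvAstep comment) (pvStateOf blocks cur kl) rest
          = pvStateOf (List.foldl (pvBstep comment) (blocks, cur) rest).1
              (List.foldl (pvBstep comment) (blocks, cur) rest).2 kl' := by
  intro rest
  induction rest with
  | nil => intro blocks cur kl; exact ⟨kl, rfl⟩
  | cons line rest ih =>
    intro blocks cur kl
    simp only [List.foldl_cons]
    by_cases hc : PySem.Chars.startswith line.toList comment.toList = true
    · have ha : pvAstep comment (pvStateOf blocks cur kl) line = pvStateOf blocks cur kl := by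
        cases cur <;> simp [pvAstep, pvStateOf, hc]
      have hb : pvBstep comment (blocks, cur) line = (blocks, cur) := by
        simp [pvBstep, hc]
      rw [ha, hb]; exact ih blocks cur kl
    · by_cases he : line = ""
      · subst he
        replace hc : PySem.Chars.startswith [] comment.toList = false := by simpa using hc
        cases cur with
        | nil =>
          have ha : pvAstep comment (pvStateOf blocks [] kl) ""
              = pvStateOf (blocks ++ [[]]) [] kl := by
            simp [pvAstep, pvStateOf, hc, pvS, pvK]
          have hb : pvBstep comment (blocks, ([] : List String)) "" = (blocks ++ [[]], []) := by
            simp [pvBstep, hc]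
          rw [ha, hb]; exact ih (blocks ++ [[]]) [] kl
        | cons k t =>
          have ha : pvAstep comment (pvStateOf blocks (k :: t) kl) ""
              = pvStateOf (blocks ++ [k :: t]) [] k := by
            simp [pvAstep, pvStateOf, hc, pvS, pvK]
          have hb : pvBstep comment (blocks, k :: t) "" = (blocks ++ [k :: t], []) := by
            simp [pvBstep, hc]
          rw [ha, hb]; exact ih (blocks ++ [k :: t]) [] k
      · cases cur with
        | nil =>
          have ha : pvAstep comment (pvStateOf blocks [] kl) line
              = pvStateOf blocks [line] kl := by
            simp [pvAstep, pvStateOf, hc, he]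
          have hb : pvBstep comment (blocks, ([] : List String)) line = (blocks, [line]) := by
            simp [pvBstep, hc, he]
          rw [ha, hb]
          obtain ⟨kl', h⟩ := ih blocks [line] line
          exact ⟨kl', h⟩
        | cons k t =>
          have ha : pvAstep comment (pvStateOf blocks (k :: t) kl) line
              = pvStateOf blocks (k :: (t ++ [line])) kl := by
            simp [pvAstep, pvStateOf, hc, he]
          have hb : pvBstep comment (blocks, k :: t) line = (blocks, k :: (t ++ [line])) := by
            simp [pvBstep, hc, he]
          rw [ha, hb]; exact ih blocks (k :: (t ++ [line])) kl

-- ===== VERDICT (by name: the statement is the Claim_ definition above) =====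
theorem parse_one_column_klasses_spec : Claim_equal_parse_one_column_klasses := by
  intro lines comment _
  unfold Spec_parse_one_column_klasses
  obtain ⟨kl', h⟩ := pv_key comment lines [] [] ""
  show (let st := List.foldl (pvAstep comment) ([], [], true, "") lines; (st.1, st.2.1))
      = (let st := List.foldl (pvBstep comment) ([], []) lines
         let blocks := st.1 ++ [st.2]
         (blocks.flatMap (fun b => b.drop 1),
          blocks.flatMap (fun b => (b.drop 1).map (fun _ => b.headD ""))))
  have h0 : pvStateOf [] [] "" = ([], [], true, "") := rfl
  rw [← h0] at *
  simp only [h]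
  cases hcur : (List.foldl (pvBstep comment) ([], []) lines).2 with
  | nil => simp [pvStateOf, pvS, pvK]
  | cons k t => simp [pvStateOf, pvS, pvK]
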